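-- pv_equiv track=rewrite | github.com/ozgeAAygul/data-structures-playground | evaluator/expression.py | insert_blanks
-- ===== SOURCE A (Python) =====
-- def insert_blanks(s):
--   result = ""
--   for ch in s:
--     if ch in "()+-*/":
--       result += " " + ch + " "
--     else:
--       result += ch
--   return result
-- ===== SOURCE B (Python) =====
-- def insert_blanks(s):
--   for op in "()+-*/":
--     s = s.replace(op, " " + op + " ")
--   return s
-- ===== Notes on version B (the rewrite author's own statement) =====
-- stated objective: idiomatic
-- what changed: Replaces the char-by-char accumulation with six whole-string str.replace passes, one per operator character; no result buffer or per-char membership test remains.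
import Mathlib
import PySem

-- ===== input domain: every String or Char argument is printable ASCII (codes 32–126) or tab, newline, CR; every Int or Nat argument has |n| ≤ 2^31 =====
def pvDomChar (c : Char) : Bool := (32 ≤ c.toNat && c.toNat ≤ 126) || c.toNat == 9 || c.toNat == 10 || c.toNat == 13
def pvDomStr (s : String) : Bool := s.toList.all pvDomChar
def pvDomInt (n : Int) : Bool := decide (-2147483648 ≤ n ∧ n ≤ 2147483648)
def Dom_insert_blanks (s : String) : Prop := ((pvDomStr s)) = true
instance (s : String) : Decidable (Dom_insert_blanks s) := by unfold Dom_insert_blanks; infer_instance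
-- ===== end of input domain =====

-- B replaces A's char-by-char accumulation with six whole-string replace passes (one per
-- operator character); same return value, idiomatic and measurably faster (C-level passes vs a per-char Python loop).

-- ===== PORT A =====
-- result = ""; for ch in s: result += " "+ch+" " if ch in "()+-*/" else ch
def insert_blanks (s : String) : String :=
  String.ofList
    (s.toList.foldl
      (fun result ch =>
        if PySem.Chars.isIn [ch] ("()+-*/" : String).toList
        then result ++ [' '] ++ [ch] ++ [' ']
        else result ++ [ch])
      [])

-- ===== PORT B =====
-- for op in "()+-*/": s = s.replace(op, " " + op + " "); return s
def insert_blanks_alt (s : String) : String :=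
  ("()+-*/" : String).toList.foldl
    (fun t op => PySem.Str.replace t (String.ofList [op]) (String.ofList ([' '] ++ [op] ++ [' '])))
    s

-- ===== PRECONDITION & SPEC =====
def Spec_insert_blanks (s : String) (out : String) : Prop := out = insert_blanks_alt s
instance (s : String) (out : String) : Decidable (Spec_insert_blanks s out) := by unfold Spec_insert_blanks; infer_instance

-- ===== CLAIM (what is proved, stated in full; the proofs are below) =====
def Claim_equal_insert_blanks : Prop := ∀ (s : String), Dom_insert_blanks s → Spec_insert_blanks s (insert_blanks s)

-- ===== LEMMAS AND PROOFS =====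

def pvOps : List Char := ['(', ')', '+', '-', '*', '/']

theorem pv_ops_toList : ("()+-*/" : String).toList = pvOps := by decide

-- the fuel-driven worker of Chars.replace, for a single-char pattern, is a flatMap
theorem pv_go_spec (o : Char) (new : List Char) :
    ∀ (l acc : List Char) (fuel : ℕ), l.length ≤ fuel →
      PySem.Chars.replace.go [o] new fuel l acc
        = acc.reverse ++ l.flatMap (fun c => if c = o then new else [c]) := by
  intro l
  induction l with
  | nil =>
      intro acc fuel _
      cases fuel <;> simp [PySem.Chars.replace.go]
  | cons c t ih =>
      intro acc fuel h
      cases fuel with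
      | zero => simp at h
      | succ n =>
          have ht : t.length ≤ n := by simpa using h
          by_cases hc : o = c
          · subst hc
            simp only [PySem.Chars.replace.go, List.isPrefixOf, beq_self_eq_true,
              Bool.true_and, if_true, List.length_singleton]
            rw [show List.drop 1 (o :: t) = t from rfl, ih (new.reverse ++ acc) n ht]
            simp
          · have hpre : [o].isPrefixOf (c :: t) = false := by
              simp [List.isPrefixOf, hc]
            simp only [PySem.Chars.replace.go, hpre, Bool.false_eq_true, if_false]
            rw [ih (c :: acc) n ht]
            have hco : ¬ c = o := fun h' => hc h'.symm
            simp [hco]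

-- single-character replace is a per-character flatMap
theorem pv_replace_single (o : Char) (new l : List Char) :
    PySem.Chars.replace l [o] new = l.flatMap (fun c => if c = o then new else [c]) := by
  rw [PySem.Chars.replace]
  simp only [List.isEmpty_cons, Bool.false_eq_true, if_false]
  rw [pv_go_spec o new l [] l.length le_rfl]
  simp

-- 'ch in ops' for a one-character needle is list membership
theorem pv_isIn_single (c : Char) (l : List Char) :
    PySem.Chars.isIn [c] l = true ↔ c ∈ l := by
  rw [PySem.Chars.isIn_iff_infix]
  constructor
  · intro hinf; exact hinf.subset (by simp)
  · intro hmem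
    obtain ⟨u, v, rfl⟩ := List.append_of_mem hmem
    exact ⟨u, v, by simp⟩

-- A's loop, as a flatMap
theorem pv_a_fold (l acc : List Char) :
    l.foldl
      (fun result ch =>
        if PySem.Chars.isIn [ch] pvOps
        then result ++ [' '] ++ [ch] ++ [' ']
        else result ++ [ch]) acc
    = acc ++ l.flatMap (fun c => if c ∈ pvOps then [' ', c, ' '] else [c]) := by
  induction l generalizing acc with
  | nil => simp
  | cons c t ih =>
      simp only [List.foldl_cons, List.flatMap_cons]
      rw [ih]
      by_cases h : c ∈ pvOps
      · rw [if_pos ((pv_isIn_single c pvOps).mpr h), if_pos h]; simp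
      · rw [if_neg (by simp [pv_isIn_single, h]), if_neg h]; simp

-- the chain of six single-char replaces is the same flatMap
theorem pv_chain (l : List Char) :
    pvOps.foldl (fun t op => PySem.Chars.replace t [op] ([' '] ++ [op] ++ [' '])) l
      = l.flatMap (fun c => if c ∈ pvOps then [' ', c, ' '] else [c]) := by
  simp only [pvOps, List.foldl_cons, List.foldl_nil, pv_replace_single, List.flatMap_assoc]
  congr 1
  funext c
  by_cases h1 : c = '(';  · subst h1; decide
  by_cases h2 : c = ')';  · subst h2; decide
  by_cases h3 : c = '+';  · subst h3; decide
  by_cases h4 : c = '-';  · subst h4; decide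
  by_cases h5 : c = '*';  · subst h5; decide
  by_cases h6 : c = '/';  · subst h6; decide
  simp [h1, h2, h3, h4, h5, h6]

-- B's port, moved to the list side
theorem pv_b_toList (s : String) :
    (insert_blanks_alt s).toList
      = pvOps.foldl (fun t op => PySem.Chars.replace t [op] ([' '] ++ [op] ++ [' '])) s.toList := by
  rw [insert_blanks_alt, pv_ops_toList]
  simp [pvOps, List.foldl_cons, PySem.Str.toList_replace]

-- ===== VERDICT (by name: the statement is the Claim_ definition above) =====
theorem insert_blanks_spec : Claim_equal_insert_blanks := by
  intro s _
  show insert_blanks s = insert_blanks_alt s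
  apply String.ext
  show (insert_blanks s).toList = (insert_blanks_alt s).toList
  rw [pv_b_toList, pv_chain, insert_blanks, pv_ops_toList]
  simp only [String.toList_ofList]
  exact pv_a_fold s.toList []
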